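-- pv_equiv track=rewrite | github.com/tompecina/legal | udn/tests.py | link_equal
-- ===== SOURCE A (Python) =====
-- def link_equal(a, b):
--     a = a.split('?')
--     b = b.split('?')
--     if a[0] != b[0]:  # pragma: no cover
--         return False
--     a = a[1].split('&')
--     a.sort()
--     b = b[1].split('&')
--     b.sort()
--     if len(a) != len(b):  # pragma: no cover
--         return False
--     for i in range(len(a)):
--         if a[i] != b[i]:  # pragma: no cover
--             return False
--     return True
-- ===== SOURCE B (Python) =====
-- def link_equal(a, b):
--     sa = a.split('?')
--     sb = b.split('?')
--     if sa[0] != sb[0]: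
--         return False
--     pa = sa[1].split('&')
--     pb = sb[1].split('&')
--     if len(pa) != len(pb):
--         return False
--     counts = {}
--     for p in pa:
--         counts[p] = counts.get(p, 0) + 1
--     for p in pb:
--         n = counts.get(p, 0)
--         if n == 0:
--             return False
--         counts[p] = n - 1
--     return True
-- ===== Notes on version B (the rewrite author's own statement) =====
-- stated objective: alternative
-- what changed: Replaces A's sort-both-lists-then-index-by-index comparison of the query parameters by a single frequency dict built over a's params and consumed by b's params (multiset equality without sorting).
import Mathlib
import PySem

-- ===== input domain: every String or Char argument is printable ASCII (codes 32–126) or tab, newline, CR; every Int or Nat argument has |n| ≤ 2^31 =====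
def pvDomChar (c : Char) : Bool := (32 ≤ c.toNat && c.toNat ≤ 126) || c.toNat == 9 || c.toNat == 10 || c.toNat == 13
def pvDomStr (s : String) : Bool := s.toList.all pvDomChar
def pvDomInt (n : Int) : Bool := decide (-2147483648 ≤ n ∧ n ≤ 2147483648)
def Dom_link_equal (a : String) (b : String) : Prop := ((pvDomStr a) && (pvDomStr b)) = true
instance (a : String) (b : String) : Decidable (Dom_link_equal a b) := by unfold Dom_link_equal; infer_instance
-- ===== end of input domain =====

-- B compares the query parameters as a multiset via a counting dict instead of sorting both lists and comparing index by index.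

-- s.split(sep) for a nonempty sep: PySem.Str.split? is none only for sep = "", so getD [] is exact here.
def pySplit (s sep : String) : List String := (PySem.Str.split? s sep).getD []

-- ===== PORT A =====
def link_equal (a : String) (b : String) : Bool :=
  let aS := pySplit a "?"
  let bS := pySplit b "?"
  if PySem.List.pyGetD aS 0 "" ≠ PySem.List.pyGetD bS 0 "" then false
  else
    let aQ := PySem.List.sorted (pySplit (PySem.List.pyGetD aS 1 "") "&") (fun x => x) false
    let bQ := PySem.List.sorted (pySplit (PySem.List.pyGetD bS 1 "") "&") (fun x => x) false
    if PySem.List.len aQ ≠ PySem.List.len bQ then false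
    else (PySem.List.pyRange 0 (PySem.List.len aQ) 1).all
      (fun i => PySem.List.pyGetD aQ i "" == PySem.List.pyGetD bQ i "")

-- ===== PORT B =====
-- Source B's second loop: decrement the count of each of b's params, early False when a count hits zero.
def linkConsume (counts : PySem.Dict String Int) : List String → Bool
  | [] => true
  | p :: rest =>
    let n := counts.getD p 0
    if n == 0 then false
    else linkConsume (counts.insert p (n - 1)) rest

def link_equal_alt (a : String) (b : String) : Bool :=
  let sa := pySplit a "?"
  let sb := pySplit b "?"
  if PySem.List.pyGetD sa 0 "" ≠ PySem.List.pyGetD sb 0 "" then false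
  else
    let pa := pySplit (PySem.List.pyGetD sa 1 "") "&"
    let pb := pySplit (PySem.List.pyGetD sb 1 "") "&"
    if PySem.List.len pa ≠ PySem.List.len pb then false
    else linkConsume (pa.foldl (fun d x => d.insert x (d.getD x 0 + 1)) PySem.Dict.empty) pb

-- ===== PRECONDITION & SPEC =====
-- Pre_ excludes exactly the inputs where the Python A raises IndexError: equal path prefixes but a URL without '?'.
def Pre_link_equal (a : String) (b : String) : Prop :=
  PySem.List.pyGetD (pySplit a "?") 0 "" = PySem.List.pyGetD (pySplit b "?") 0 "" →
    (PySem.Str.isIn "?" a = true ∧ PySem.Str.isIn "?" b = true)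
instance (a : String) (b : String) : Decidable (Pre_link_equal a b) := by unfold Pre_link_equal; infer_instance
def pvWitness_link_equal : String × String := ("x?p=1&q=2", "x?q=2&p=1")

def Spec_link_equal (a : String) (b : String) (out : Bool) : Prop := out = link_equal_alt a b
instance (a : String) (b : String) (out : Bool) : Decidable (Spec_link_equal a b out) := by unfold Spec_link_equal; infer_instance

-- ===== CLAIM (what is proved, stated in full; the proofs are below) =====
def Claim_equal_link_equal : Prop := ∀ (a : String) (b : String), Dom_link_equal a b → Pre_link_equal a b → Spec_link_equal a b (link_equal a b)

-- ===== LEMMAS AND PROOFS =====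

-- A's index loop on equal-length lists is list equality.
lemma all_range_eq (xs ys : List String) (h : xs.length = ys.length) :
    ((PySem.List.pyRange 0 (PySem.List.len xs) 1).all
      (fun i => PySem.List.pyGetD xs i "" == PySem.List.pyGetD ys i "")) = decide (xs = ys) := by
  rw [Bool.eq_iff_iff]
  simp only [PySem.List.len_eq, PySem.List.pyRange_zero_natCast, List.all_map, List.all_eq_true,
    Function.comp, PySem.List.pyGetD_natCast, List.mem_range, beq_iff_eq, decide_eq_true_eq]
  constructor
  · intro hall
    apply List.ext_getElem h
    intro k hk hk'
    have := hall k hk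
    rwa [List.getD_eq_getElem _ _ hk, List.getD_eq_getElem _ _ hk'] at this
  · intro he k hk
    subst he; rfl

-- B's consuming loop succeeds iff every count in l is at most its count in the dict.
lemma linkConsume_true_iff (l : List String) (d : PySem.Dict String Int)
    (hnn : ∀ v, 0 ≤ d.getD v 0) :
    linkConsume d l = true ↔ ∀ v, (l.count v : Int) ≤ d.getD v 0 := by
  induction l generalizing d with
  | nil => simpa [linkConsume] using hnn
  | cons p rest ih =>
    simp only [linkConsume]
    by_cases h0 : d.getD p 0 = 0
    · simp only [h0, beq_self_eq_true, if_true]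
      constructor
      · intro h; cases h
      · intro h
        have := h p
        simp [h0] at this
        omega
    · have hpos : 0 < d.getD p 0 := lt_of_le_of_ne (hnn p) (Ne.symm h0)
      simp only [beq_iff_eq, h0, if_false]
      rw [ih _ (by
        intro v
        rw [PySem.Dict.getD_insert]
        split_ifs with hv
        · omega
        · exact hnn v)]
      constructor
      · intro hall v
        have := hall v
        rw [PySem.Dict.getD_insert] at this
        by_cases hv : v = p
        · subst hv
          rw [if_pos rfl] at this
          simp only [List.count_cons, beq_self_eq_true, if_true]
          push_cast
          omega
        · simp only [if_neg hv] at this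
          simpa [List.count_cons, Ne.symm hv] using this
      · intro hall v
        rw [PySem.Dict.getD_insert]
        have := hall v
        by_cases hv : v = p
        · subst hv
          rw [if_pos rfl]
          simp only [List.count_cons, beq_self_eq_true, if_true] at this
          push_cast at this
          omega
        · simp only [if_neg hv]
          simpa [List.count_cons, Ne.symm hv] using this

-- core: on equal-length param lists, sort-and-compare equals count-and-consume.
lemma core (pa pb : List String) (h : pa.length = pb.length) :
    (decide (PySem.List.sorted pa (fun x => x) false = PySem.List.sorted pb (fun x => x) false))
      = linkConsume (pa.foldl (fun d x => d.insert x (d.getD x 0 + 1)) PySem.Dict.empty) pb := by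
  rw [PySem.Dict.foldl_insert_getD_add_one_eq_counter, Bool.eq_iff_iff]
  rw [linkConsume_true_iff _ _ (by intro v; rw [PySem.Dict.getD_counter]; positivity)]
  simp only [decide_eq_true_eq, PySem.List.sorted_id_eq_sorted_id_iff_perm, PySem.Dict.getD_counter]
  constructor
  · intro hp v
    exact_mod_cast Nat.le_of_eq (hp.symm.count_eq v)
  · intro hc
    have hle : (↑pb : Multiset String) ≤ ↑pa := by
      rw [Multiset.le_iff_count]
      intro v
      simpa using hc v
    have := Multiset.eq_of_le_of_card_le hle (by simpa using h.le)
    exact Multiset.coe_eq_coe.mp this.symm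

-- ===== VERDICT (by name: the statement is the Claim_ definition above) =====
set_option maxHeartbeats 1000000 in
theorem link_equal_spec : Claim_equal_link_equal := by
  intro a b _ _
  unfold Spec_link_equal link_equal link_equal_alt
  by_cases hpre : PySem.List.pyGetD (pySplit a "?") 0 "" = PySem.List.pyGetD (pySplit b "?") 0 ""
  · simp only [hpre, ne_eq, not_true_eq_false, if_false]
    set pa := pySplit (PySem.List.pyGetD (pySplit a "?") 1 "") "&" with hpa
    set pb := pySplit (PySem.List.pyGetD (pySplit b "?") 1 "") "&" with hpb
    by_cases hlen : pa.length = pb.length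
    · rw [if_neg (by simp [PySem.List.len_eq, PySem.List.length_sorted, hlen]),
          if_neg (by simp [PySem.List.len_eq, hlen]),
          all_range_eq _ _ (by simp [PySem.List.length_sorted, hlen]),
          core pa pb hlen]
    · rw [if_pos (by simp [PySem.List.len_eq, PySem.List.length_sorted, hlen]),
          if_pos (by simp [PySem.List.len_eq, hlen])]
  · simp [hpre]
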